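-- pv_equiv track=rewrite | github.com/Ellin/Piano-Hero | trial_analyzer.py | check_order_error
-- ===== SOURCE A (Python) =====
-- def check_order_error(given_list, press_list):
-- 	# intersections of press_list & given_list, but unlike set(), keeps duplicate elements & also preserves order
-- 	given_list_mod = [x for x in given_list if x in press_list]
-- 	press_list_mod = [x for x in press_list if x in given_list_mod]
-- 	order_error = 0		# 0 = False, 1 = True
-- 	order_hits = 0
-- 	j = 0
-- 	for i in range(len(press_list_mod)):
-- 		if press_list_mod[i] == given_list_mod[j]:
-- 			order_hits = order_hits + 1
-- 			if len(given_list_mod) - 1 > j: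
-- 				j = j + 1
--
-- 	if order_hits < len(given_list_mod):
-- 		order_error = 1
--
-- 	return order_error
-- ===== SOURCE B (Python) =====
-- def check_order_error(given_list, press_list):
--     # same two filter steps as A (list membership, preserving duplicates & order)
--     given_list_mod = [x for x in given_list if x in press_list]
--     press_list_mod = [x for x in press_list if x in given_list_mod]
--     # subsequence check driven over given_list_mod, consuming press_list_mod once
--     it = iter(press_list_mod)
--     return 0 if all(x in it for x in given_list_mod) else 1
-- ===== Notes on version B (the rewrite author's own statement) =====
-- stated objective: simpler
-- what changed: A's index-counting loop over press_list_mod with a manually clamped pointer and a hit counter is replaced by a direct subsequence test that drives over given_list_mod, consuming an iterator of press_list_mod.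
import Mathlib
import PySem

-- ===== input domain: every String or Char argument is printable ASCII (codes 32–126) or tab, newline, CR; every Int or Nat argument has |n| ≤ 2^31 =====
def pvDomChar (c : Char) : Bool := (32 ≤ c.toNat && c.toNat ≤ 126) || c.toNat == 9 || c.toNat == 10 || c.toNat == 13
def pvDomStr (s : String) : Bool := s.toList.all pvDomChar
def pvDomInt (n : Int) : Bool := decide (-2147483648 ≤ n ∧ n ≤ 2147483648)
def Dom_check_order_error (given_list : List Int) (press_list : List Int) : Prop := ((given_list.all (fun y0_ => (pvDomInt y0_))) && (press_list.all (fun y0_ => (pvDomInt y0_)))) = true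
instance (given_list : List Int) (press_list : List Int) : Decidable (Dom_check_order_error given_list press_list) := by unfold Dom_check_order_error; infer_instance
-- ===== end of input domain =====

-- B replaces A's hit-counting loop with a clamped pointer by a direct subsequence test
-- driving over given_list_mod and consuming press_list_mod once (objective: simpler).

-- ===== PORT A =====
-- the for-loop over press_list_mod with state (order_hits, j); j stays a Nat since it
-- starts at 0 and is only ever incremented (Python `len(gm)-1 > j` becomes `j+1 < gm.length`,
-- equivalent for j ≥ 0 including the empty case); `given_list_mod[j]` is `gm.getD j 0`,
-- exact because in any executed iteration gm ≠ [] and j < gm.length.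
def aLoop (gm : List Int) : List Int → Nat → Nat → Nat
  | [], hits, _ => hits
  | p :: ps, hits, j =>
      if p = gm.getD j 0 then
        aLoop gm ps (hits + 1) (if j + 1 < gm.length then j + 1 else j)
      else
        aLoop gm ps hits j

def check_order_error (given_list : List Int) (press_list : List Int) : Int :=
  let given_list_mod := given_list.filter (fun x => press_list.contains x)
  let press_list_mod := press_list.filter (fun x => given_list_mod.contains x)
  let order_hits := aLoop given_list_mod press_list_mod 0 0
  if order_hits < given_list_mod.length then 1 else 0

-- ===== PORT B =====
-- `x in it` on an iterator: scan for the first occurrence of x, return the remaining tail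
def findConsume (x : Int) : List Int → Option (List Int)
  | [] => none
  | p :: ps => if p = x then some ps else findConsume x ps

-- `all(x in it for x in gm)` with it = iter(pm)
def allInIter : List Int → List Int → Bool
  | [], _ => true
  | g :: gs, pm =>
      match findConsume g pm with
      | none => false
      | some pm' => allInIter gs pm'

def check_order_error_alt (given_list : List Int) (press_list : List Int) : Int :=
  let given_list_mod := given_list.filter (fun x => press_list.contains x)
  let press_list_mod := press_list.filter (fun x => given_list_mod.contains x)
  if allInIter given_list_mod press_list_mod then 0 else 1

-- ===== PRECONDITION & SPEC =====
def Spec_check_order_error (given_list : List Int) (press_list : List Int) (out : Int) : Prop := out = check_order_error_alt given_list press_list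
instance (given_list : List Int) (press_list : List Int) (out : Int) : Decidable (Spec_check_order_error given_list press_list out) := by unfold Spec_check_order_error; infer_instance

-- ===== CLAIM (what is proved, stated in full; the proofs are below) =====
def Claim_equal_check_order_error : Prop := ∀ (given_list : List Int) (press_list : List Int), Dom_check_order_error given_list press_list → Spec_check_order_error given_list press_list (check_order_error given_list press_list)

-- ===== LEMMAS AND PROOFS =====

-- proof-side reformulation of A's loop as a recursion on the untouched suffix of gm
def gCount : List Int → List Int → Nat
  | [], _ => 0
  | [x], pm => pm.count x
  | x :: y :: gs, pm =>
      match findConsume x pm with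
      | none => 0
      | some pm' => 1 + gCount (y :: gs) pm'

theorem aLoop_eq_gCount (gm : List Int) (pm : List Int) :
    ∀ j hits, j < gm.length → aLoop gm pm hits j = hits + gCount (gm.drop j) pm := by
  induction pm with
  | nil =>
      intro j hits hj
      have hdrop : gm.drop j = gm[j] :: gm.drop (j + 1) := List.drop_eq_getElem_cons hj
      simp only [aLoop, hdrop]
      cases h : gm.drop (j + 1) with
      | nil => simp [gCount]
      | cons a l => simp [gCount, findConsume]
  | cons p ps ih =>
      intro j hits hj
      have hdrop : gm.drop j = gm[j] :: gm.drop (j + 1) := List.drop_eq_getElem_cons hj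
      have hget : gm.getD j 0 = gm[j] := List.getD_eq_getElem gm 0 hj
      have h1 : aLoop gm (p :: ps) hits j
          = if p = gm.getD j 0 then
              aLoop gm ps (hits + 1) (if j + 1 < gm.length then j + 1 else j)
            else aLoop gm ps hits j := rfl
      rw [h1, hget]
      by_cases hlt : j + 1 < gm.length
      · -- the tail gm.drop (j+1) is nonempty
        have hdrop2 : gm.drop (j + 1) = gm[j+1] :: gm.drop (j + 2) := List.drop_eq_getElem_cons hlt
        by_cases hp : p = gm[j]
        · rw [if_pos hp, if_pos hlt, ih (j + 1) (hits + 1) hlt, hdrop, hdrop2]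
          simp only [gCount]
          rw [show findConsume gm[j] (p :: ps) = some ps from by
            simp only [findConsume]; rw [if_pos hp]]
          show hits + 1 + gCount (gm[j + 1] :: gm.drop (j + 2)) ps
              = hits + (1 + gCount (gm[j + 1] :: gm.drop (j + 2)) ps)
          omega
        · rw [if_neg hp, ih j hits hj, hdrop, hdrop2]
          simp only [gCount]
          rw [show findConsume gm[j] (p :: ps) = findConsume gm[j] ps from by
            simp only [findConsume]; rw [if_neg hp]]
      · -- j is the last index: gm.drop (j+1) = [] and gCount counts gm[j]
        have hnil : gm.drop (j + 1) = [] := List.drop_eq_nil_of_le (by omega)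
        by_cases hp : p = gm[j]
        · rw [if_pos hp, if_neg hlt, ih j (hits + 1) hj, hdrop, hnil]
          simp only [gCount]
          rw [hp, List.count_cons_self]
          omega
        · rw [if_neg hp, ih j hits hj, hdrop, hnil]
          simp only [gCount]
          rw [List.count_cons_of_ne hp]

theorem findConsume_none_iff (x : Int) (pm : List Int) :
    findConsume x pm = none ↔ x ∉ pm := by
  induction pm with
  | nil => simp [findConsume]
  | cons p ps ih =>
      by_cases hp : p = x
      · simp [findConsume, hp]
      · have hxp : ¬ x = p := fun h => hp h.symm
        simp [findConsume, hp, ih, hxp]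

theorem gCount_iff_allInIter (gm : List Int) :
    ∀ pm, gm ≠ [] → (gm.length ≤ gCount gm pm ↔ allInIter gm pm = true) := by
  induction gm with
  | nil => intro pm h; exact absurd rfl h
  | cons x gs ih =>
      intro pm _
      cases gs with
      | nil =>
          simp only [gCount, allInIter, List.length_singleton]
          constructor
          · intro h
            have hx : x ∈ pm := List.count_pos_iff.mp (by omega)
            cases hc : findConsume x pm with
            | none => exact absurd ((findConsume_none_iff x pm).mp hc) (by simp [hx])
            | some pm' => simp
          · intro h
            cases hc : findConsume x pm with
            | none => simp [hc] at h
            | some pm' =>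
                have hmem : x ∈ pm := by
                  by_contra hx
                  rw [(findConsume_none_iff x pm).mpr hx] at hc
                  simp at hc
                exact List.count_pos_iff.mpr hmem
      | cons y gs' =>
          simp only [gCount, allInIter]
          cases hc : findConsume x pm with
          | none => simp
          | some pm' =>
              have := ih pm' (by simp)
              simp only [List.length_cons] at this ⊢
              constructor
              · intro h; exact this.mp (by omega)
              · intro h; have := this.mpr h; omega

-- ===== VERDICT (by name: the statement is the Claim_ definition above) =====
theorem check_order_error_spec : Claim_equal_check_order_error := by
  intro given_list press_list _
  unfold Spec_check_order_error check_order_error check_order_error_alt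
  show (if aLoop (given_list.filter (fun x => press_list.contains x))
            (press_list.filter (fun x => (given_list.filter (fun x => press_list.contains x)).contains x)) 0 0 <
          (given_list.filter (fun x => press_list.contains x)).length then (1 : Int) else 0) =
       (if allInIter (given_list.filter (fun x => press_list.contains x))
            (press_list.filter (fun x => (given_list.filter (fun x => press_list.contains x)).contains x)) then (0 : Int) else 1)
  set gm := given_list.filter (fun x => press_list.contains x) with hgm
  set pm := press_list.filter (fun x => gm.contains x) with hpm
  cases hgmc : gm with
  | nil =>
      have hpmnil : pm = [] := by rw [hpm, hgmc]; simp
      rw [hpmnil]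
      simp [aLoop, allInIter]
  | cons g gs =>
      have hne : gm ≠ [] := by rw [hgmc]; simp
      rw [← hgmc]
      rw [aLoop_eq_gCount gm pm 0 0 (by rw [hgmc]; simp)]
      simp only [List.drop_zero, Nat.zero_add]
      by_cases hall : allInIter gm pm = true
      · have := (gCount_iff_allInIter gm pm hne).mpr hall
        rw [if_neg (by omega), if_pos hall]
      · have hgc : ¬ gm.length ≤ gCount gm pm :=
          fun h => hall ((gCount_iff_allInIter gm pm hne).mp h)
        rw [if_pos (by omega), if_neg (by simpa using hall)]
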